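-- pv_equiv track=rewrite | github.com/aratno/148A1 | Metascratch 2.py | get_options
-- ===== SOURCE A (Python) =====
-- import math
--
-- max_target = 100
--
-- def get_options(game_state):
--     """
--     int -> list
--     Given a game state, find the list of possible moves.
--     """
--     output = []
--     for i in range(1, math.ceil(math.sqrt(max_target))):
--             if i**2 <= game_state:
--                 output.append(i)
--             else:
--                 break
--     return output
-- ===== SOURCE B (Python) =====
-- import math
--
-- def get_options(game_state):
--     if game_state < 1:
--         return []
--     k = min(math.isqrt(game_state), 9)
--     return list(range(1, k + 1))
-- ===== Notes on version B (the rewrite author's own statement) =====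
-- stated objective: simpler
-- what changed: Replaces the loop-and-break over range(1,10) with a closed form: the answer is list(range(1, min(isqrt(game_state), 9)+1)), empty when game_state < 1.
import Mathlib
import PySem

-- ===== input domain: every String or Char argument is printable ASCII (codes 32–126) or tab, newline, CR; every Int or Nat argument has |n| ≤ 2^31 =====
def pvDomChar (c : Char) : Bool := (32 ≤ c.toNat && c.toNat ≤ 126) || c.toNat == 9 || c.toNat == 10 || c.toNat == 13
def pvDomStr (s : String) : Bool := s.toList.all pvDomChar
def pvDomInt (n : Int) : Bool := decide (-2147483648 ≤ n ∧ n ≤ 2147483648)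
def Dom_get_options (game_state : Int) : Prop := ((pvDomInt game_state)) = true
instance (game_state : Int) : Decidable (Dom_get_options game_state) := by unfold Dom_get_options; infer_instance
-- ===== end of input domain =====

-- B replaces A's loop-and-break by a closed form min(isqrt(game_state), 9); same return value, objective: simpler.

-- ===== PORT A =====
-- the for-loop with break, over the same state (output accumulator)
def pvLoopA : List Int → Int → List Int → List Int
  | [], _, output => output
  | i :: rest, game_state, output =>
      if i ^ 2 ≤ game_state then pvLoopA rest game_state (output ++ [i]) else output

-- math.ceil(math.sqrt(100)) = 10 exactly (sqrt(100) is the exact float 10.0), so range(1, 10)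
def get_options (game_state : Int) : List Int :=
  pvLoopA (PySem.List.pyRange 1 10 1) game_state []

-- ===== PORT B =====
-- math.isqrt(game_state) on a nonnegative Int is Nat.sqrt of its toNat
def get_options_alt (game_state : Int) : List Int :=
  if game_state < 1 then []
  else
    let k : Nat := min (Nat.sqrt game_state.toNat) 9
    PySem.List.pyRange 1 ((k : Int) + 1) 1

-- ===== PRECONDITION & SPEC =====
def Spec_get_options (game_state : Int) (out : List Int) : Prop := out = get_options_alt game_state
instance (game_state : Int) (out : List Int) : Decidable (Spec_get_options game_state out) := by unfold Spec_get_options; infer_instance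

-- ===== CLAIM (what is proved, stated in full; the proofs are below) =====
def Claim_equal_get_options : Prop := ∀ (game_state : Int), Dom_get_options game_state → Spec_get_options game_state (get_options game_state)

-- ===== LEMMAS AND PROOFS =====

lemma pvLoopA_eq_takeWhile (gs : Int) :
    ∀ (l out : List Int), pvLoopA l gs out = out ++ l.takeWhile (fun i => decide (i ^ 2 ≤ gs)) := by
  intro l
  induction l with
  | nil => intro out; simp [pvLoopA]
  | cons i rest ih =>
      intro out
      by_cases h : i ^ 2 ≤ gs
      · simp [pvLoopA, h, ih, List.takeWhile]
      · simp [pvLoopA, h, List.takeWhile]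

-- ===== VERDICT (by name: the statement is the Claim_ definition above) =====
theorem get_options_spec : Claim_equal_get_options := by
  intro gs _
  show get_options gs = get_options_alt gs
  rw [get_options, pvLoopA_eq_takeWhile, List.nil_append]
  have hrange : PySem.List.pyRange 1 10 1 = [1, 2, 3, 4, 5, 6, 7, 8, 9] := by decide
  rw [hrange]
  by_cases hneg : gs < 1
  · have h1 : ¬ ((1 : Int) ^ 2 ≤ gs) := by omega
    simp [get_options_alt, hneg, List.takeWhile, show ¬(1:Int) ≤ gs from by omega]
  · have hge : (0 : Int) ≤ gs := by omega
    have hs1 : Nat.sqrt gs.toNat * Nat.sqrt gs.toNat ≤ gs.toNat := by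
      simpa [pow_two] using Nat.sqrt_le' gs.toNat
    have hs2 : gs.toNat < (Nat.sqrt gs.toNat + 1) * (Nat.sqrt gs.toNat + 1) := by
      simpa [pow_two, Nat.succ_eq_add_one] using Nat.lt_succ_sqrt' gs.toNat
    have htn : (gs.toNat : Int) = gs := Int.toNat_of_nonneg hge
    rw [get_options_alt, if_neg hneg]
    obtain ⟨k, hkdef⟩ : ∃ k, Nat.sqrt gs.toNat = k := ⟨_, rfl⟩
    rw [hkdef] at hs1 hs2 ⊢
    by_cases hbig : 9 ≤ k
    · have h81 : (81 : Int) ≤ gs := by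
        have : 81 ≤ k * k := Nat.mul_le_mul hbig hbig
        omega
      have hmin : min k 9 = 9 := by omega
      rw [hmin]
      have hall : ∀ i ∈ [1, 2, 3, 4, 5, 6, 7, 8, 9], decide ((i : Int) ^ 2 ≤ gs) = true := by
        intro i hi
        fin_cases hi <;> simp <;> nlinarith
      rw [List.takeWhile_eq_self_iff.mpr hall]
      decide
    · have hk8 : k ≤ 8 := by omega
      interval_cases k
      · simp only [List.takeWhile, show ¬(((1:Int))^2 ≤ gs) from by omega, decide_false]
        decide
      · simp only [List.takeWhile, show (((1:Int))^2 ≤ gs) from by omega, show ¬(((2:Int))^2 ≤ gs) from by omega, decide_true, decide_false]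
        decide
      · simp only [List.takeWhile, show (((1:Int))^2 ≤ gs) from by omega, show (((2:Int))^2 ≤ gs) from by omega, show ¬(((3:Int))^2 ≤ gs) from by omega, decide_true, decide_false]
        decide
      · simp only [List.takeWhile, show (((1:Int))^2 ≤ gs) from by omega, show (((2:Int))^2 ≤ gs) from by omega, show (((3:Int))^2 ≤ gs) from by omega, show ¬(((4:Int))^2 ≤ gs) from by omega, decide_true, decide_false]
        decide
      · simp only [List.takeWhile, show (((1:Int))^2 ≤ gs) from by omega, show (((2:Int))^2 ≤ gs) from by omega, show (((3:Int))^2 ≤ gs) from by omega, show (((4:Int))^2 ≤ gs) from by omega, show ¬(((5:Int))^2 ≤ gs) from by omega, decide_true, decide_false]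
        decide
      · simp only [List.takeWhile, show (((1:Int))^2 ≤ gs) from by omega, show (((2:Int))^2 ≤ gs) from by omega, show (((3:Int))^2 ≤ gs) from by omega, show (((4:Int))^2 ≤ gs) from by omega, show (((5:Int))^2 ≤ gs) from by omega, show ¬(((6:Int))^2 ≤ gs) from by omega, decide_true, decide_false]
        decide
      · simp only [List.takeWhile, show (((1:Int))^2 ≤ gs) from by omega, show (((2:Int))^2 ≤ gs) from by omega, show (((3:Int))^2 ≤ gs) from by omega, show (((4:Int))^2 ≤ gs) from by omega, show (((5:Int))^2 ≤ gs) from by omega, show (((6:Int))^2 ≤ gs) from by omega, show ¬(((7:Int))^2 ≤ gs) from by omega, decide_true, decide_false]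
        decide
      · simp only [List.takeWhile, show (((1:Int))^2 ≤ gs) from by omega, show (((2:Int))^2 ≤ gs) from by omega, show (((3:Int))^2 ≤ gs) from by omega, show (((4:Int))^2 ≤ gs) from by omega, show (((5:Int))^2 ≤ gs) from by omega, show (((6:Int))^2 ≤ gs) from by omega, show (((7:Int))^2 ≤ gs) from by omega, show ¬(((8:Int))^2 ≤ gs) from by omega, decide_true, decide_false]
        decide
      · simp only [List.takeWhile, show (((1:Int))^2 ≤ gs) from by omega, show (((2:Int))^2 ≤ gs) from by omega, show (((3:Int))^2 ≤ gs) from by omega, show (((4:Int))^2 ≤ gs) from by omega, show (((5:Int))^2 ≤ gs) from by omega, show (((6:Int))^2 ≤ gs) from by omega, show (((7:Int))^2 ≤ gs) from by omega, show (((8:Int))^2 ≤ gs) from by omega, show ¬(((9:Int))^2 ≤ gs) from by omega, decide_true, decide_false]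
        decide
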